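-- pv_equiv track=rewrite | github.com/sa1am9/second_for_evo | main.py | search
-- ===== SOURCE A (Python) =====
-- def search(lst: list, name: str) -> list:
--     phone_numbers = []  # list of numbers satisfying the condition
--
--     for i in lst:
--         if i.startswith(name):
--             # search of the first number with input parameters
--             phone_numbers.append(i)
--             break
--
--     if len(phone_numbers):
--         # checking for at least one number
--         try:
--             for k in range(lst.index(i)+1, lst.index(i)+10):
--                 # as the list is sorted we check some 10 numbers on the condition
--                 if not lst[k].startswith(name):
--                     return phone_numbers
--                 else:
--                     phone_numbers.append(lst[k])
--             return phone_numbers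
--         except IndexError:  # if the required numbers are at the end of the list
--             return phone_numbers
--
--     else:
--         return []
-- ===== SOURCE B (Python) =====
-- def search(lst: list, name: str) -> list:
--     # Index-arithmetic formulation: one comprehension collects all matching
--     # positions, the leading consecutive run is counted arithmetically, and
--     # the answer is a single slice -- no early-exit scan, no list.index
--     # rescans, no exception-driven control flow.
--     idxs = [i for i, s in enumerate(lst) if s.startswith(name)]
--     if not idxs:
--         return []
--     run = sum(1 for k, i in enumerate(idxs) if i == idxs[0] + k)
--     return lst[idxs[0]: idxs[0] + min(run, 10)]
-- ===== Notes on version B (the rewrite author's own statement) =====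
-- stated objective: alternative
-- what changed: B recasts the task as index arithmetic: one comprehension collects every matching position, the leading consecutive run is counted by comparing positions against idxs[0]+k, and the answer is a single slice lst[i0:i0+min(run,10)] -- replacing A's early-exit scan, break-and-rescan via two list.index calls, and try/except IndexError control flow.
import Mathlib
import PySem

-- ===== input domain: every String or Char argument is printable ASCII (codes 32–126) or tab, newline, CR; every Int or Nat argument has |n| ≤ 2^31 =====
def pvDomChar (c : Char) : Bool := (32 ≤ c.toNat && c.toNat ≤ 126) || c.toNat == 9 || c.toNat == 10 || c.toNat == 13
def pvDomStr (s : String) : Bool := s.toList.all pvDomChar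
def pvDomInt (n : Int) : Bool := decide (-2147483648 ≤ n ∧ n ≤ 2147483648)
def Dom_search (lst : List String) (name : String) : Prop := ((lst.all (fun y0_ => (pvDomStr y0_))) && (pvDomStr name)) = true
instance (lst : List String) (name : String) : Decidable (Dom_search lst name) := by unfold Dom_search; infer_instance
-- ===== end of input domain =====

-- B replaces A's break-and-rescan (two list.index calls) and try/except IndexError with an
-- index-arithmetic formulation: collect all matching positions, count the leading consecutive
-- run arithmetically, return one slice (objective: alternative, same O(n) cost).

-- ===== PORT A =====
-- A's first for-loop with break: the first element of lst starting with name, if any.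
def searchFind (lst : List String) (name : String) : Option String :=
  match lst with
  | [] => none
  | x :: r => if PySem.Str.startswith x name then some x else searchFind r name

-- A's second loop: for k in the remaining range, stop on IndexError (pyGet? = none)
-- or on the first non-matching element, otherwise append lst[k].
def searchLoopA (lst : List String) (name : String) (ks : List Int) (acc : List String) : List String :=
  match ks with
  | [] => acc
  | k :: rest =>
    match PySem.List.pyGet? lst k with
    | none => acc  -- IndexError: return phone_numbers
    | some s =>
      if ¬ PySem.Str.startswith s name then acc
      else searchLoopA lst name rest (acc ++ [s])

def search (lst : List String) (name : String) : List String :=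
  match searchFind lst name with
  | none => []
  | some i =>
    match PySem.List.index? lst i with
    | none => []  -- unreachable: i is an element of lst, so lst.index(i) never raises ValueError
    | some idx => searchLoopA lst name (PySem.List.pyRange ((idx : Int) + 1) ((idx : Int) + 10) 1) [i]

-- ===== PORT B =====
def search_alt (lst : List String) (name : String) : List String :=
  -- idxs = [i for i, s in enumerate(lst) if s.startswith(name)]
  let idxs := ((PySem.List.enumerate lst 0).filter (fun q => PySem.Str.startswith q.2 name)).map Prod.fst
  match idxs with
  | [] => []                                   -- if not idxs: return []
  | i0 :: _ =>
    -- run = sum(1 for k, i in enumerate(idxs) if i == idxs[0] + k)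
    let run := ((PySem.List.enumerate idxs 0).filter (fun q => q.2 == i0 + q.1)).length
    -- return lst[idxs[0] : idxs[0] + min(run, 10)]
    PySem.List.slice lst (some i0) (some (i0 + ((min run 10 : Nat) : Int)))

-- ===== PRECONDITION & SPEC =====
def Spec_search (lst : List String) (name : String) (out : List String) : Prop := out = search_alt lst name
instance (lst : List String) (name : String) (out : List String) : Decidable (Spec_search lst name out) := by unfold Spec_search; infer_instance

-- ===== CLAIM (what is proved, stated in full; the proofs are below) =====
def Claim_equal_search : Prop := ∀ (lst : List String) (name : String), Dom_search lst name → Spec_search lst name (search lst name)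

-- ===== LEMMAS AND PROOFS =====

-- proof-only helper: the list of matching positions, positions counted from off
def idxFrom (name : String) (off : Int) : List String → List Int
  | [] => []
  | x :: r => if PySem.Str.startswith x name then off :: idxFrom name (off + 1) r else idxFrom name (off + 1) r

theorem idxs_eq_idxFrom (name : String) : ∀ (xs : List String) (off : Int),
    ((PySem.List.enumerate xs off).filter (fun q => PySem.Str.startswith q.2 name)).map Prod.fst
      = idxFrom name off xs := by
  intro xs
  induction xs with
  | nil => intro off; simp [PySem.List.enumerate_nil, idxFrom]
  | cons x r ih =>
    intro off
    rw [PySem.List.enumerate_cons]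
    have ih' : List.map Prod.fst
        (List.filter (fun q => PySem.Chars.startswith q.2.toList name.toList) (PySem.List.enumerate r (off + 1)))
        = idxFrom name (off + 1) r := by simpa using ih (off + 1)
    cases hp : PySem.Chars.startswith x.toList name.toList with
    | true => simp [PySem.Str.startswith_eq, hp, idxFrom, ih']
    | false => simp [PySem.Str.startswith_eq, hp, idxFrom, ih']

theorem idxFrom_append (name : String) : ∀ (pre xs : List String) (off : Int),
    (∀ y ∈ pre, PySem.Chars.startswith y.toList name.toList = false) →
    idxFrom name off (pre ++ xs) = idxFrom name (off + pre.length) xs := by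
  intro pre
  induction pre with
  | nil => intro xs off _; simp
  | cons y t ih =>
    intro xs off h
    have hy := h y (by simp)
    rw [List.cons_append, idxFrom]
    simp only [PySem.Str.startswith_eq, hy, Bool.false_eq_true, if_false]
    rw [ih xs (off + 1) (fun z hz => h z (by simp [hz]))]
    congr 1
    simp only [List.length_cons]
    push_cast
    ring

-- positions strictly beyond i0 + k never contribute to the run count
theorem count_idxFrom_gt (name : String) : ∀ (xs : List String) (off k i0 : Int),
    i0 + k < off →
    ((PySem.List.enumerate (idxFrom name off xs) k).filter (fun q => q.2 == i0 + q.1)).length = 0 := by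
  intro xs
  induction xs with
  | nil => intro off k i0 _; simp [idxFrom, PySem.List.enumerate_nil]
  | cons x r ih =>
    intro off k i0 hlt
    rw [idxFrom]
    cases hp : PySem.Chars.startswith x.toList name.toList with
    | true =>
      simp only [PySem.Str.startswith_eq, hp, if_true]
      rw [PySem.List.enumerate_cons, List.filter_cons]
      have hne : ((off == i0 + k) : Bool) = false := by
        simp only [beq_eq_false_iff_ne]; omega
      simp only [hne, Bool.false_eq_true, if_false]
      exact ih (off + 1) (k + 1) i0 (by omega)
    | false =>
      simp only [PySem.Str.startswith_eq, hp, Bool.false_eq_true, if_false]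
      exact ih (off + 1) k i0 (by omega)

-- the run count equals the length of the matching prefix
theorem count_idxFrom_eq (name : String) : ∀ (xs : List String) (off k i0 : Int),
    off = i0 + k →
    ((PySem.List.enumerate (idxFrom name off xs) k).filter (fun q => q.2 == i0 + q.1)).length
      = (xs.takeWhile (fun x => PySem.Str.startswith x name)).length := by
  intro xs
  induction xs with
  | nil => intro off k i0 _; simp [idxFrom, PySem.List.enumerate_nil]
  | cons x r ih =>
    intro off k i0 heq
    rw [idxFrom, List.takeWhile_cons]
    cases hp : PySem.Chars.startswith x.toList name.toList with
    | true =>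
      simp only [PySem.Str.startswith_eq, hp, if_true]
      rw [PySem.List.enumerate_cons, List.filter_cons]
      have hb : ((off == i0 + k) : Bool) = true := by simp [heq]
      simp only [hb, if_true, List.length_cons]
      rw [ih (off + 1) (k + 1) i0 (by omega)]
      simp
    | false =>
      simp only [PySem.Str.startswith_eq, hp, Bool.false_eq_true, if_false]
      exact count_idxFrom_gt name r (off + 1) k i0 (by omega)

theorem searchFind_append (name : String) : ∀ (pre : List String) (x : String) (r : List String),
    (∀ y ∈ pre, PySem.Chars.startswith y.toList name.toList = false) →
    PySem.Chars.startswith x.toList name.toList = true →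
    searchFind (pre ++ x :: r) name = some x := by
  intro pre
  induction pre with
  | nil => intro x r _ hx; simp [searchFind, hx]
  | cons y t ih =>
    intro x r h hx
    have hy := h y (by simp)
    rw [List.cons_append, searchFind]
    simp only [PySem.Str.startswith_eq, hy, Bool.false_eq_true, if_false]
    exact ih x r (fun z hz => h z (by simp [hz])) hx

theorem idxFrom_nil (name : String) : ∀ (xs : List String) (off : Int),
    (∀ y ∈ xs, PySem.Chars.startswith y.toList name.toList = false) →
    idxFrom name off xs = [] := by
  intro xs
  induction xs with
  | nil => intro off _; rfl
  | cons y t ih =>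
    intro off h
    rw [idxFrom]
    simp only [PySem.Str.startswith_eq, h y (by simp), Bool.false_eq_true, if_false]
    exact ih (off + 1) (fun z hz => h z (by simp [hz]))

theorem dropWhile_head_false {α : Type} (q : α → Bool) : ∀ (l : List α) (x : α) (r : List α),
    l.dropWhile q = x :: r → q x = false := by
  intro l
  induction l with
  | nil => intro x r h; cases h
  | cons y t ih =>
    intro x r h
    rw [List.dropWhile_cons] at h
    by_cases hq : q y = true
    · simp only [hq, if_true] at h
      exact ih x r h
    · have hq' : q y = false := by simpa using hq
      rw [hq'] at h
      simp only [Bool.false_eq_true, if_false] at h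
      injection h with h1 _
      rw [← h1, hq']

theorem searchFind_none (name : String) : ∀ (xs : List String),
    (∀ y ∈ xs, PySem.Chars.startswith y.toList name.toList = false) →
    searchFind xs name = none := by
  intro xs
  induction xs with
  | nil => intro _; rfl
  | cons y t ih =>
    intro h
    have hy := h y (by simp)
    rw [searchFind]
    simp only [PySem.Str.startswith_eq, hy, Bool.false_eq_true, if_false]
    exact ih (fun z hz => h z (by simp [hz]))

theorem searchLoopA_eq (lst : List String) (name : String) : ∀ (n j : Nat) (acc : List String),
    searchLoopA lst name (PySem.List.pyRange (j : Int) ((j : Int) + (n : Int)) 1) acc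
      = acc ++ ((lst.drop j).take n).takeWhile (fun x => PySem.Str.startswith x name) := by
  intro n
  induction n with
  | zero =>
    intro j acc
    rw [PySem.List.pyRange_one_eq_nil (by omega)]
    simp [searchLoopA]
  | succ n ih =>
    intro j acc
    rw [PySem.List.pyRange_one_cons (by push_cast; omega)]
    by_cases hj : j < lst.length
    · have hdrop : lst.drop j = lst[j] :: lst.drop (j + 1) :=
        (List.getElem_cons_drop hj).symm
      have hget : PySem.List.pyGet? lst (j : Int) = some lst[j] := by
        simp [PySem.List.pyGet?_natCast, List.getElem?_eq_getElem hj]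
      rw [searchLoopA, hget]
      cases hp : PySem.Chars.startswith lst[j].toList name.toList with
      | false =>
        rw [hdrop, List.take_succ_cons, List.takeWhile_cons]
        simp [hp]
      | true =>
        simp only [PySem.Str.startswith_eq, hp]
        rw [show ((j : Int) + (((n : Nat) + 1 : Nat) : Int)) = ((j + 1 : Nat) : Int) + (n : Int) by push_cast; ring,
            show ((j : Int) + 1) = ((j + 1 : Nat) : Int) by push_cast; ring]
        rw [ih (j + 1) (acc ++ [lst[j]])]
        rw [hdrop, List.take_succ_cons, List.takeWhile_cons]
        simp [hp]
    · have hget : PySem.List.pyGet? lst (j : Int) = none := by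
        simp [PySem.List.pyGet?_natCast, List.getElem?_eq_none (by omega : lst.length ≤ j)]
      rw [searchLoopA, hget]
      rw [show lst.drop j = [] from List.drop_eq_nil_of_le (by omega)]
      simp

theorem index?_first (s : String) : ∀ (pre suf : List String), (∀ x ∈ pre, x ≠ s) →
    PySem.List.index? (pre ++ s :: suf) s = some pre.length := by
  intro pre suf hpre
  rw [PySem.List.index?_eq_some_iff]
  exact ⟨pre, suf, rfl, rfl, fun h => (hpre s h) rfl⟩

-- takeWhile commutes with take
theorem takeWhile_take {α : Type} (p : α → Bool) : ∀ (n : Nat) (l : List α),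
    (l.take n).takeWhile p = (l.takeWhile p).take n := by
  intro n
  induction n with
  | zero => intro l; simp
  | succ n ih =>
    intro l
    cases l with
    | nil => simp
    | cons y t =>
      rw [List.take_succ_cons, List.takeWhile_cons, List.takeWhile_cons]
      cases hp : p y with
      | true => simp [ih t]
      | false => simp

theorem takeWhile_eq_take {α : Type} (p : α → Bool) (l : List α) :
    l.takeWhile p = l.take (l.takeWhile p).length :=
  List.prefix_iff_eq_take.mp (List.takeWhile_prefix p)

-- A's value on a decomposed input: first match x at position pre.length
theorem A_char (name : String) (pre : List String) (x : String) (r : List String)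
    (hpre : ∀ y ∈ pre, PySem.Chars.startswith y.toList name.toList = false)
    (hx : PySem.Chars.startswith x.toList name.toList = true) :
    search (pre ++ x :: r) name
      = x :: (r.take 9).takeWhile (fun s => PySem.Str.startswith s name) := by
  have hne : ∀ y ∈ pre, y ≠ x := by
    intro y hy hyx
    have := hpre y hy
    rw [hyx, hx] at this
    exact Bool.true_eq_false.mp this
  rw [search, searchFind_append name pre x r hpre hx]
  simp only [index?_first x pre r hne]
  have h9 := searchLoopA_eq (pre ++ x :: r) name 9 (pre.length + 1) [x]
  rw [show ((pre.length + 1 : Nat) : Int) = (pre.length : Int) + 1 by push_cast; ring] at h9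
  rw [show ((pre.length : Int) + 1 + ((9 : Nat) : Int)) = (pre.length : Int) + 10 by push_cast; ring] at h9
  have hdrop1 : (pre ++ x :: r).drop (pre.length + 1) = r := by
    rw [show pre.length + 1 = (pre ++ [x]).length by simp,
        show pre ++ x :: r = (pre ++ [x]) ++ r by simp]
    simp
  rw [h9, hdrop1]
  rfl

-- B's value on the same decomposed input
theorem B_char (name : String) (pre : List String) (x : String) (r : List String)
    (hpre : ∀ y ∈ pre, PySem.Chars.startswith y.toList name.toList = false)
    (hx : PySem.Chars.startswith x.toList name.toList = true) :
    search_alt (pre ++ x :: r) name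
      = (x :: r).take (min ((x :: r).takeWhile (fun s => PySem.Str.startswith s name)).length 10) := by
  rw [search_alt]
  simp only [idxs_eq_idxFrom]
  rw [idxFrom_append name pre (x :: r) 0 hpre]
  rw [show idxFrom name (0 + (pre.length : Int)) (x :: r)
        = (pre.length : Int) :: idxFrom name ((pre.length : Int) + 1) r by
    rw [idxFrom]
    simp [PySem.Str.startswith_eq, hx]]
  simp only
  have hcnt := count_idxFrom_eq name (x :: r) (pre.length : Int) 0 (pre.length : Int) (by omega)
  rw [show ((pre.length : Int) :: idxFrom name ((pre.length : Int) + 1) r)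
        = idxFrom name (pre.length : Int) (x :: r) by
    rw [idxFrom]; simp [PySem.Str.startswith_eq, hx]]
  rw [hcnt]
  rw [PySem.List.slice_natCast_add]
  rw [show (pre ++ x :: r).drop pre.length = x :: r by
    rw [List.drop_left]]

-- the two characterisations coincide
theorem char_eq (name : String) (x : String) (r : List String)
    (hx : PySem.Chars.startswith x.toList name.toList = true) :
    x :: (r.take 9).takeWhile (fun s => PySem.Str.startswith s name)
      = (x :: r).take (min ((x :: r).takeWhile (fun s => PySem.Str.startswith s name)).length 10) := by
  set p : String → Bool := fun s => PySem.Str.startswith s name with hpdef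
  have hpx : p x = true := by simp [hpdef, PySem.Str.startswith_eq, hx]
  rw [List.takeWhile_cons, hpx]
  simp only [if_true, List.length_cons]
  set m := (r.takeWhile p).length with hm
  rw [show min ((r.takeWhile p).length + 1) 10 = min m 9 + 1 by omega]
  rw [List.take_succ_cons]
  congr 1
  rw [takeWhile_take p 9 r, takeWhile_eq_take p r, ← hm, List.take_take]
  rw [Nat.min_comm]

theorem no_match_case (lst : List String) (name : String)
    (h : ∀ y ∈ lst, PySem.Chars.startswith y.toList name.toList = false) :
    search lst name = [] ∧ search_alt lst name = [] := by
  constructor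
  · rw [search, searchFind_none name lst h]
  · rw [search_alt]
    simp only [idxs_eq_idxFrom]
    rw [idxFrom_nil name lst 0 h]

-- ===== VERDICT (by name: the statement is the Claim_ definition above) =====
theorem search_spec : Claim_equal_search := by
  intro lst name _
  unfold Spec_search
  set p : String → Bool := fun s => PySem.Chars.startswith s.toList name.toList with hpdef
  have hsplit : lst = lst.takeWhile (fun y => !p y) ++ lst.dropWhile (fun y => !p y) :=
    (List.takeWhile_append_dropWhile).symm
  have hpre : ∀ y ∈ lst.takeWhile (fun y => !p y), PySem.Chars.startswith y.toList name.toList = false := by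
    intro y hy
    have := List.mem_takeWhile_imp hy
    simpa [hpdef] using this
  cases hd : lst.dropWhile (fun y => !p y) with
  | nil =>
    have hall : ∀ y ∈ lst, PySem.Chars.startswith y.toList name.toList = false := by
      intro y hy
      rw [hsplit, hd, List.append_nil] at hy
      exact hpre y hy
    obtain ⟨h1, h2⟩ := no_match_case lst name hall
    rw [h1, h2]
  | cons x r =>
    have hx : PySem.Chars.startswith x.toList name.toList = true := by
      have := dropWhile_head_false (fun y => !p y) lst x r hd
      simpa [hpdef] using this
    have heq : lst = lst.takeWhile (fun y => !p y) ++ x :: r := by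
      conv_lhs => rw [hsplit]
      rw [hd]
    rw [heq, A_char name _ x r hpre hx, B_char name _ x r hpre hx, char_eq name x r hx]
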